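-- pv_equiv track=rewrite | github.com/rputnam0/paper_ocr | src/paper_ocr/table_rectifier.py | _collapse_header_rows
-- ===== SOURCE A (Python) =====
-- from typing import Any, Awaitable, Callable
--
-- def _normalize_cell_text(value: Any) -> str:
--     return " ".join(str(value or "").replace("\r", " ").replace("\n", " ").split())
--
-- def _collapse_header_rows(header_rows: list[list[str]]) -> list[str]:
--     if not header_rows:
--         return []
--     max_cols = max((len(row) for row in header_rows), default=0)
--     if max_cols <= 0:
--         return []
--     normalized = [list(row) + [""] * (max_cols - len(row)) for row in header_rows]
--     out: list[str] = []
--     for col in range(max_cols):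
--         tokens: list[str] = []
--         for row in normalized:
--             token = _normalize_cell_text(row[col])
--             if not token:
--                 continue
--             if not tokens or tokens[-1] != token:
--                 tokens.append(token)
--         if not tokens:
--             out.append("")
--         elif len(tokens) == 1:
--             out.append(tokens[0])
--         else:
--             out.append(f"{tokens[0]} ({' / '.join(tokens[1:])})")
--     return out
-- ===== SOURCE B (Python) =====
-- def _normalize_cell_text(value):
--     return " ".join(str(value or "").replace("\r", " ").replace("\n", " ").split())
--
--
-- def _merge_row(cols, row):
--     """Merge one header row into the per-column collapsed-token accumulators."""
--     out = []
--     for j in range(max(len(cols), len(row))):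
--         tokens = cols[j] if j < len(cols) else []
--         token = _normalize_cell_text(row[j]) if j < len(row) else ""
--         if token and (not tokens or tokens[-1] != token):
--             tokens = tokens + [token]
--         out.append(tokens)
--     return out
--
--
-- def _fmt(tokens):
--     if not tokens:
--         return ""
--     head, rest = tokens[0], tokens[1:]
--     return head if not rest else f"{head} ({' / '.join(rest)})"
--
--
-- def _collapse_header_rows(header_rows: list[list[str]]) -> list[str]:
--     cols: list[list[str]] = []
--     for row in header_rows:
--         cols = _merge_row(cols, row)
--     return [_fmt(tokens) for tokens in cols]
-- ===== Notes on version B (the rewrite author's own statement) =====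
-- stated objective: alternative
-- what changed: B is a single row-major streaming fold: each header row is merged into a running list of per-column collapsed-token accumulators (growing it on demand), so the max_cols precomputation, the explicit row padding and A's column-major indexed rescans of all rows disappear; it trades some constant/asymptotic cost for the streaming structure.
import Mathlib
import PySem

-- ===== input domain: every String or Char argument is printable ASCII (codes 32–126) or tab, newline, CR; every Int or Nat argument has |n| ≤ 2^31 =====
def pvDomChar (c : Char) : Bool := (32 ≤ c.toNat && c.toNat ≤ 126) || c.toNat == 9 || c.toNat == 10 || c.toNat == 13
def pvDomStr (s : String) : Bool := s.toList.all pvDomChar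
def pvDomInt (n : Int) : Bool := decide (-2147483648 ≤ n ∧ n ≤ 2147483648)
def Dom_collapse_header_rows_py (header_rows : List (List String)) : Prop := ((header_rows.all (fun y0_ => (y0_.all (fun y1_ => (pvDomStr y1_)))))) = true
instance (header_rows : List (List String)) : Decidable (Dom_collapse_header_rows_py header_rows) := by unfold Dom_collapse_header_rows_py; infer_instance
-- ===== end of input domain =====

-- B replaces A's pad-then-column-major indexed scans by a single row-major streaming
-- fold that merges each row into per-column collapsed-token accumulators. Objective: alternative.


-- ===== PORT A =====
-- _normalize_cell_text: " ".join(str(value or "").replace("\r", " ").replace("\n", " ").split())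
-- (value is a str here, so `str(value or "")` is `value` itself)
def normCell (value : String) : String :=
  PySem.Str.join " "
    (PySem.Str.split₀ (PySem.Str.replace (PySem.Str.replace value "\r" " ") "\n" " "))

def collapse_header_rows_py (header_rows : List (List String)) : List String :=
  if header_rows = [] then []
  else
    let max_cols := (header_rows.map (fun row => row.length)).foldl Nat.max 0
    if max_cols ≤ 0 then []
    else
      let normalized := header_rows.map (fun row => row ++ List.replicate (max_cols - row.length) "")
      (List.range max_cols).foldl (fun out col =>
        let tokens := normalized.foldl (fun tokens row =>
          if normCell ((row[col]?).getD "") = "" then tokens   -- token = _normalize_cell_text(row[col]); row[col] is in range after padding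
          else if tokens = [] ∨ tokens.getLast? ≠ some (normCell ((row[col]?).getD "")) then
            tokens ++ [normCell ((row[col]?).getD "")]
          else tokens) []
        if tokens = [] then out ++ [""]
        else if tokens.length = 1 then out ++ [tokens.headD ""]
        else out ++ [tokens.headD "" ++ " (" ++ PySem.Str.join " / " tokens.tail ++ ")"]) []

-- ===== PORT B =====
-- _merge_row: merge one header row into the per-column collapsed-token accumulators
def mergeRow (cols : List (List String)) (row : List String) : List (List String) :=
  (List.range (Nat.max cols.length row.length)).map (fun j =>
    let tokens := (cols[j]?).getD []
    let token := if j < row.length then normCell ((row[j]?).getD "") else ""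
    if token ≠ "" ∧ (tokens = [] ∨ tokens.getLast? ≠ some token) then tokens ++ [token]
    else tokens)

-- _fmt
def fmtB : List String → String
  | [] => ""
  | head :: rest =>
    if rest = [] then head
    else head ++ " (" ++ PySem.Str.join " / " rest ++ ")"

def collapse_header_rows_py_alt (header_rows : List (List String)) : List String :=
  (header_rows.foldl mergeRow []).map fmtB

-- ===== PRECONDITION & SPEC =====
def Spec_collapse_header_rows_py (header_rows : List (List String)) (out : List String) : Prop := out = collapse_header_rows_py_alt header_rows
instance (header_rows : List (List String)) (out : List String) : Decidable (Spec_collapse_header_rows_py header_rows out) := by unfold Spec_collapse_header_rows_py; infer_instance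

-- ===== CLAIM (what is proved, stated in full; the proofs are below) =====
def Claim_equal_collapse_header_rows_py : Prop := ∀ (header_rows : List (List String)), Dom_collapse_header_rows_py header_rows → Spec_collapse_header_rows_py header_rows (collapse_header_rows_py header_rows)

-- ===== LEMMAS AND PROOFS =====

-- the per-column collapsing step, shared shape of both sides' per-cell update
def stepT (j : Nat) (tokens : List String) (r : List String) : List String :=
  let token := normCell ((r[j]?).getD "")
  if token ≠ "" ∧ (tokens = [] ∨ tokens.getLast? ≠ some token) then tokens ++ [token]
  else tokens

theorem normCell_empty : normCell "" = "" := by decide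

theorem stepT_out (j : Nat) (tokens : List String) (r : List String) (h : r.length ≤ j) :
    stepT j tokens r = tokens := by
  have hnone : r[j]? = none := List.getElem?_eq_none h
  simp [stepT, hnone, normCell_empty]

-- padding with "" does not change the defaulted lookup
theorem pad_getD (r : List String) (k i : Nat) :
    ((r ++ List.replicate k "")[i]?).getD "" = (r[i]?).getD "" := by
  induction r generalizing i with
  | nil =>
    simp only [List.nil_append]
    induction k generalizing i with
    | zero => rfl
    | succ k ih =>
      cases i with
      | zero => rfl
      | succ i => simpa using ih i
  | cons a r ih =>
    cases i with
    | zero => rfl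
    | succ i => simpa using ih i

-- one merge step, on a state of the invariant shape
theorem mergeRow_inv (n : Nat) (f : Nat → List String) (r : List String)
    (hf : ∀ j, n ≤ j → f j = []) :
    mergeRow ((List.range n).map f) r
      = (List.range (Nat.max n r.length)).map (fun j => stepT j (f j) r) := by
  unfold mergeRow
  rw [List.length_map, List.length_range]
  apply List.map_congr_left
  intro j hj
  have hlook : ((((List.range n).map f)[j]?).getD []) = f j := by
    by_cases hjn : j < n
    · rw [List.getElem?_map, List.getElem?_range hjn]; rfl
    · have hnone : ((List.range n).map f)[j]? = none := by
        apply List.getElem?_eq_none; simpa using Nat.le_of_not_lt hjn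
      rw [hnone, Option.getD_none, hf j (Nat.le_of_not_lt hjn)]
  simp only [hlook]
  by_cases hjr : j < r.length
  · simp only [if_pos hjr, stepT]
  · rw [if_neg hjr, stepT_out j (f j) r (Nat.le_of_not_lt hjr)]
    simp

-- B's fold maintains the invariant: state = range(max len so far) mapped through the column folds
theorem foldl_mergeRow_inv (rows : List (List String)) (n : Nat) (f : Nat → List String)
    (hf : ∀ j, n ≤ j → f j = []) :
    rows.foldl mergeRow ((List.range n).map f)
      = (List.range ((rows.map (fun row => row.length)).foldl Nat.max n)).map
          (fun j => rows.foldl (stepT j) (f j)) := by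
  induction rows generalizing n f with
  | nil => simp
  | cons r rows ih =>
    simp only [List.foldl_cons, List.map_cons]
    rw [mergeRow_inv n f r hf]
    exact ih (Nat.max n r.length) (fun j => stepT j (f j) r)
      (fun j hj => by
        dsimp only
        rw [hf j (le_trans (Nat.le_max_left _ _) hj),
            stepT_out j [] r (le_trans (Nat.le_max_right _ _) hj)])

-- A's per-cell update is stepT
theorem stepA_eq (col : Nat) (tokens : List String) (r : List String) :
    (if normCell ((r[col]?).getD "") = "" then tokens
     else if tokens = [] ∨ tokens.getLast? ≠ some (normCell ((r[col]?).getD "")) then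
       tokens ++ [normCell ((r[col]?).getD "")]
     else tokens) = stepT col tokens r := by
  unfold stepT
  by_cases h : normCell ((r[col]?).getD "") = ""
  · rw [if_pos h]
    rw [if_neg]
    intro hcon
    exact hcon.1 h
  · rw [if_neg h]
    by_cases hc : tokens = [] ∨ tokens.getLast? ≠ some (normCell ((r[col]?).getD ""))
    · rw [if_pos hc, if_pos ⟨h, hc⟩]
    · rw [if_neg hc, if_neg (fun hcon => hc hcon.2)]

-- A's per-column fold over the padded rows is the plain column fold
theorem colA_eq (rows : List (List String)) (n col : Nat) (acc : List String) :
    (rows.map (fun row => row ++ List.replicate (n - row.length) "")).foldl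
      (fun tokens row =>
        if normCell ((row[col]?).getD "") = "" then tokens
        else if tokens = [] ∨ tokens.getLast? ≠ some (normCell ((row[col]?).getD "")) then
          tokens ++ [normCell ((row[col]?).getD "")]
        else tokens) acc
    = rows.foldl (stepT col) acc := by
  induction rows generalizing acc with
  | nil => simp only [List.map_nil, List.foldl_nil]
  | cons r rows ih =>
    rw [List.map_cons, List.foldl_cons, List.foldl_cons]
    simp only [pad_getD]
    rw [stepA_eq]
    exact ih _

-- A's output loop, appending one formatted entry per column, is a map
theorem foldl_out3 {α : Type} (T : α → List String) (l : List α) (acc : List String) :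
    l.foldl (fun out col =>
      if T col = [] then out ++ [""]
      else if (T col).length = 1 then out ++ [(T col).headD ""]
      else out ++ [(T col).headD "" ++ " (" ++ PySem.Str.join " / " (T col).tail ++ ")"]) acc
    = acc ++ l.map (fun col =>
      if T col = [] then ""
      else if (T col).length = 1 then (T col).headD ""
      else (T col).headD "" ++ " (" ++ PySem.Str.join " / " (T col).tail ++ ")") := by
  induction l generalizing acc with
  | nil => simp
  | cons a l ih =>
    simp only [List.foldl_cons, List.map_cons]
    split_ifs with h1 h2
    · rw [ih]; simp
    · rw [ih]; simp
    · rw [ih]; simp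

-- the two output formattings agree
theorem fmt_eq (tokens : List String) :
    (if tokens = [] then ""
     else if tokens.length = 1 then tokens.headD ""
     else tokens.headD "" ++ " (" ++ PySem.Str.join " / " tokens.tail ++ ")")
    = fmtB tokens := by
  match tokens with
  | [] => rfl
  | [a] => rfl
  | a :: b :: l => simp [fmtB, List.length]

-- ===== VERDICT (by name: the statement is the Claim_ definition above) =====
theorem collapse_header_rows_py_spec : Claim_equal_collapse_header_rows_py := by
  intro header_rows _
  show collapse_header_rows_py header_rows = collapse_header_rows_py_alt header_rows
  unfold collapse_header_rows_py collapse_header_rows_py_alt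
  have hB : header_rows.foldl mergeRow []
      = (List.range ((header_rows.map (fun row => row.length)).foldl Nat.max 0)).map
          (fun j => header_rows.foldl (stepT j) []) := by
    simpa using foldl_mergeRow_inv header_rows 0 (fun _ => []) (fun _ _ => rfl)
  rw [hB]
  by_cases hnil : header_rows = []
  · subst hnil; rfl
  · simp only [if_neg hnil]
    by_cases hz : ((header_rows.map (fun row => row.length)).foldl Nat.max 0) ≤ 0
    · have h0 : ((header_rows.map (fun row => row.length)).foldl Nat.max 0) = 0 :=
        Nat.le_zero.mp hz
      rw [h0]
      rfl
    · simp only [if_neg hz]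
      rw [foldl_out3 (fun col =>
        (header_rows.map (fun row =>
            row ++ List.replicate
              ((header_rows.map (fun row => row.length)).foldl Nat.max 0 - row.length) "")).foldl
          (fun tokens row =>
            if normCell ((row[col]?).getD "") = "" then tokens
            else if tokens = [] ∨ tokens.getLast? ≠ some (normCell ((row[col]?).getD "")) then
              tokens ++ [normCell ((row[col]?).getD "")]
            else tokens) [])]
      rw [List.map_map, List.nil_append]
      apply List.map_congr_left
      intro col _
      simp only [Function.comp_apply, colA_eq]
      exact fmt_eq _
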